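-- pv_equiv track=rewrite | github.com/SuryaMalladi/ai-bi-platform | app.py | _infer_function_from_columns
-- ===== SOURCE A (Python) =====
-- def _infer_function_from_columns(df_columns):
--     """Infer function from dataset column names when role is vague."""
--     if not df_columns:
--         return "Executive"
--     cols_lower = " ".join(df_columns).lower()
--     if any(k in cols_lower for k in ["budget","actual","variance","cost","expense","profit"]):
--         return "Finance"
--     if any(k in cols_lower for k in ["sales","revenue","target","quota","units sold"]):
--         return "Sales"
--     if any(k in cols_lower for k in ["employee","attrition","headcount","tenure","satisfaction"]):
--         return "HR"
--     if any(k in cols_lower for k in ["defects","downtime","efficiency","produced","cycle"]):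
--         return "Operations"
--     return "Executive"
-- ===== SOURCE B (Python) =====
-- _KEYWORD_CATEGORY = [
--     ("budget", "Finance"), ("actual", "Finance"), ("variance", "Finance"),
--     ("cost", "Finance"), ("expense", "Finance"), ("profit", "Finance"),
--     ("sales", "Sales"), ("revenue", "Sales"), ("target", "Sales"),
--     ("quota", "Sales"), ("units sold", "Sales"),
--     ("employee", "HR"), ("attrition", "HR"), ("headcount", "HR"),
--     ("tenure", "HR"), ("satisfaction", "HR"),
--     ("defects", "Operations"), ("downtime", "Operations"),
--     ("efficiency", "Operations"), ("produced", "Operations"), ("cycle", "Operations"),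
-- ]
--
-- # keywords bucketed by first character: a rudimentary multi-pattern matcher
-- _FIRST_CHAR_INDEX = {}
-- for _kw, _cat in _KEYWORD_CATEGORY:
--     _FIRST_CHAR_INDEX.setdefault(_kw[0], []).append((_kw, _cat))
--
-- _PRIORITY = ["Finance", "Sales", "HR", "Operations"]
--
--
-- def _infer_function_from_columns(df_columns):
--     """Infer function from dataset column names when role is vague."""
--     if not df_columns:
--         return "Executive"
--     text = " ".join(df_columns).lower()
--     # Single text-driven scan: at each position try only the keywords whose
--     # first character matches, collecting the set of matched categories;
--     # then pick the first matched category in fixed priority order.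
--     matched = set()
--     for i in range(len(text)):
--         for kw, cat in _FIRST_CHAR_INDEX.get(text[i], ()):
--             if text.startswith(kw, i):
--                 matched.add(cat)
--     for cat in _PRIORITY:
--         if cat in matched:
--             return cat
--     return "Executive"
-- ===== Notes on version B (the rewrite author's own statement) =====
-- stated objective: alternative
-- what changed: Instead of A's keyword-driven if/any substring tests with early exit, B does one text-driven multi-pattern scan: keywords are bucketed by first character into a dict built once, the scan walks every position of the joined lowered text trying only the bucket of that position's character, collects the set of matched categories, and finally selects the first matched category in the fixed Finance/Sales/HR/Operations priority order.
import Mathlib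
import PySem

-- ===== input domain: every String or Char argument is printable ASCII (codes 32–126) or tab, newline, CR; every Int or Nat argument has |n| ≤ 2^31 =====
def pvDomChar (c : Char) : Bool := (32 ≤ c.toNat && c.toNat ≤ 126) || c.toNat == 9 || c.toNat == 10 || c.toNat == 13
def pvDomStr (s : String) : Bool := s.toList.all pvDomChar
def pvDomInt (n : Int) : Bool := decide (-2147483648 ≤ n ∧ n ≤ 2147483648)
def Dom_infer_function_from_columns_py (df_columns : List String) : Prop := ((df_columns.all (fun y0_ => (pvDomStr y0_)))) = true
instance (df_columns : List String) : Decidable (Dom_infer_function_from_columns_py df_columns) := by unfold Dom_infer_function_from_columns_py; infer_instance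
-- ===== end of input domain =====

-- B replaces A's keyword-driven if/any substring tests by a text-driven position scan collecting the set of matched categories, then a priority-selection pass (alternative algorithm, similar cost).

-- ===== PORT A =====
def infer_function_from_columns_py (df_columns : List String) : String :=
  if df_columns = [] then "Executive"
  else
    let cols_lower := PySem.Str.lower (PySem.Str.join " " df_columns)
    if (["budget", "actual", "variance", "cost", "expense", "profit"].any
        (fun k => PySem.Str.isIn k cols_lower)) then "Finance"
    else if (["sales", "revenue", "target", "quota", "units sold"].any
        (fun k => PySem.Str.isIn k cols_lower)) then "Sales"
    else if (["employee", "attrition", "headcount", "tenure", "satisfaction"].any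
        (fun k => PySem.Str.isIn k cols_lower)) then "HR"
    else if (["defects", "downtime", "efficiency", "produced", "cycle"].any
        (fun k => PySem.Str.isIn k cols_lower)) then "Operations"
    else "Executive"

-- ===== PORT B =====
def pvKeywordCategory : List (String × String) :=
  [("budget", "Finance"), ("actual", "Finance"), ("variance", "Finance"),
   ("cost", "Finance"), ("expense", "Finance"), ("profit", "Finance"),
   ("sales", "Sales"), ("revenue", "Sales"), ("target", "Sales"),
   ("quota", "Sales"), ("units sold", "Sales"),
   ("employee", "HR"), ("attrition", "HR"), ("headcount", "HR"),
   ("tenure", "HR"), ("satisfaction", "HR"),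
   ("defects", "Operations"), ("downtime", "Operations"),
   ("efficiency", "Operations"), ("produced", "Operations"), ("cycle", "Operations")]

-- _FIRST_CHAR_INDEX: the setdefault/append loop; kw[0] is headD (every keyword is nonempty, so exact)
def pvFirstCharIndex : PySem.Dict Char (List (String × String)) :=
  pvKeywordCategory.foldl
    (fun d p => d.modify (p.1.toList.headD ' ') [] (· ++ [p])) PySem.Dict.empty

def pvPriority : List String := ["Finance", "Sales", "HR", "Operations"]

-- the scan loop: for i in range(len(text)): for kw, cat in _FIRST_CHAR_INDEX.get(text[i], ()): if text.startswith(kw, i): matched.add(cat)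
-- text[i] for 0 ≤ i < len is tl.getD i; Python's text.startswith(kw, i) for 0 ≤ i is exactly kw.toList.isPrefixOf (text.drop i) (exact here)
def pvScan (tl : List Char) : PySem.Set String :=
  (List.range tl.length).foldl
    (fun acc i =>
      (pvFirstCharIndex.getD (tl.getD i ' ') []).foldl
        (fun acc2 p =>
          if p.1.toList.isPrefixOf (tl.drop i) then PySem.Set.add acc2 p.2 else acc2)
        acc)
    PySem.Set.empty

-- the final priority loop: for cat in _PRIORITY: if cat in matched: return cat / return "Executive"
def pvPick (matched : PySem.Set String) : List String → String
  | [] => "Executive"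
  | c :: rest => if PySem.Set.contains matched c then c else pvPick matched rest

def infer_function_from_columns_py_alt (df_columns : List String) : String :=
  if df_columns = [] then "Executive"
  else
    let text := PySem.Str.lower (PySem.Str.join " " df_columns)
    pvPick (pvScan text.toList) pvPriority

-- ===== PRECONDITION & SPEC =====
def Spec_infer_function_from_columns_py (df_columns : List String) (out : String) : Prop := out = infer_function_from_columns_py_alt df_columns
instance (df_columns : List String) (out : String) : Decidable (Spec_infer_function_from_columns_py df_columns out) := by unfold Spec_infer_function_from_columns_py; infer_instance

-- ===== CLAIM =====
def Claim_equal_infer_function_from_columns_py : Prop := ∀ (df_columns : List String), Dom_infer_function_from_columns_py df_columns → Spec_infer_function_from_columns_py df_columns (infer_function_from_columns_py df_columns)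

-- ===== LEMMAS AND PROOFS =====

-- membership in the inner (keyword-bucket) fold
lemma pv_mem_inner (tl : List Char) (i : Nat) (table : List (String × String))
    (acc : PySem.Set String) (y : String) :
    (y ∈ table.foldl
        (fun acc2 p =>
          if p.1.toList.isPrefixOf (tl.drop i) then PySem.Set.add acc2 p.2 else acc2)
        acc) ↔
      y ∈ acc ∨ ∃ p ∈ table, p.1.toList.isPrefixOf (tl.drop i) ∧ y = p.2 := by
  induction table generalizing acc with
  | nil => simp
  | cons p rest ih =>
      simp only [List.foldl_cons]
      by_cases h : p.1.toList.isPrefixOf (tl.drop i) = true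
      · have h' : p.1.toList <+: tl.drop i := List.isPrefixOf_iff_prefix.mp h
        rw [if_pos h, ih]
        simp [PySem.Set.mem_add]
        tauto
      · have h' : ¬ p.1.toList <+: tl.drop i := fun hh => h (List.isPrefixOf_iff_prefix.mpr hh)
        rw [if_neg h, ih]
        simp
        tauto

-- membership in the outer (position) fold, for an arbitrary per-position table
lemma pv_mem_outer (tl : List Char) (tbl : Nat → List (String × String))
    (ns : List Nat) (acc : PySem.Set String) (y : String) :
    (y ∈ ns.foldl
        (fun acc i =>
          (tbl i).foldl
            (fun acc2 p =>
              if p.1.toList.isPrefixOf (tl.drop i) then PySem.Set.add acc2 p.2 else acc2)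
            acc)
        acc) ↔
      y ∈ acc ∨ ∃ i ∈ ns, ∃ p ∈ tbl i, p.1.toList.isPrefixOf (tl.drop i) ∧ y = p.2 := by
  induction ns generalizing acc with
  | nil => simp
  | cons n rest ih =>
      simp only [List.foldl_cons]
      rw [ih, pv_mem_inner]
      simp only [List.mem_cons]
      constructor
      · rintro ((h | h) | ⟨i, hi, h⟩)
        · exact Or.inl h
        · exact Or.inr ⟨n, Or.inl rfl, h⟩
        · exact Or.inr ⟨i, Or.inr hi, h⟩
      · rintro (h | ⟨i, hi | hi, h⟩)
        · exact Or.inl (Or.inl h)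
        · exact Or.inl (Or.inr (hi ▸ h))
        · exact Or.inr ⟨i, hi, h⟩

-- the first-character index is the table filtered by first character
lemma pv_bucket_eq (c : Char) :
    PySem.Dict.getD pvFirstCharIndex c [] =
      pvKeywordCategory.filter (fun p => p.1.toList.headD ' ' == c) := by
  have h : pvFirstCharIndex =
      (pvKeywordCategory.map (fun p => (p.1.toList.headD ' ', p))).foldl
        (fun d q => d.modify q.1 [] (· ++ [q.2])) PySem.Dict.empty := by
    rw [List.foldl_map]
    rfl
  rw [h, PySem.Dict.getD_foldl_modify_append]
  simp [List.filter_map, Function.comp_def]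

lemma pv_mem_bucket (c : Char) (p : String × String) :
    p ∈ PySem.Dict.getD pvFirstCharIndex c [] ↔
      p ∈ pvKeywordCategory ∧ p.1.toList.headD ' ' = c := by
  rw [pv_bucket_eq, List.mem_filter]
  simp

-- every keyword in the table is nonempty
lemma pv_keyword_ne_nil (p : String × String) (hp : p ∈ pvKeywordCategory) :
    p.1.toList ≠ [] := by
  fin_cases hp <;> decide

-- at each position the bucket scan sees exactly the full-table matches
lemma pv_bucket_exists (tl : List Char) (i : Nat) (y : String) :
    (∃ p ∈ PySem.Dict.getD pvFirstCharIndex (tl.getD i ' ') [],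
        p.1.toList.isPrefixOf (tl.drop i) ∧ y = p.2) ↔
      (∃ p ∈ pvKeywordCategory, p.1.toList.isPrefixOf (tl.drop i) ∧ y = p.2) := by
  constructor
  · rintro ⟨p, hp, h⟩
    exact ⟨p, (pv_mem_bucket _ p).mp hp |>.1, h⟩
  · rintro ⟨p, hp, hpre, hy⟩
    have hne : p.1.toList ≠ [] := pv_keyword_ne_nil p hp
    refine ⟨p, (pv_mem_bucket _ p).mpr ⟨hp, ?_⟩, hpre, hy⟩
    have h' : p.1.toList <+: tl.drop i := List.isPrefixOf_iff_prefix.mp hpre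
    obtain ⟨t, ht⟩ := h'
    obtain ⟨k, ks, hk⟩ := List.exists_cons_of_ne_nil hne
    have hdrop : tl.drop i = k :: (ks ++ t) := by rw [← ht, hk]; simp
    have : tl[i]? = some k := by
      rw [← List.head?_drop, hdrop]; rfl
    simp [hk, List.getD, this]

-- a nonempty keyword matches at some scanned position iff it is a substring ('k in text')
lemma pv_exists_pos_iff_isIn (tl kw : List Char) (hne : kw ≠ []) :
    (∃ i ∈ List.range tl.length, kw.isPrefixOf (tl.drop i)) ↔
      PySem.Chars.isIn kw tl = true := by
  rw [← PySem.Chars.exists_prefix_drop_iff_isIn]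
  constructor
  · rintro ⟨i, _, h⟩
    exact ⟨i, List.isPrefixOf_iff_prefix.mp h⟩
  · rintro ⟨j, h⟩
    by_cases hj : j < tl.length
    · exact ⟨j, by simpa [List.mem_range], List.isPrefixOf_iff_prefix.mpr h⟩
    · exfalso
      rw [List.drop_eq_nil_of_le (by omega)] at h
      exact hne (List.prefix_nil.mp h)

-- the scanned set contains exactly the categories with a matching keyword
lemma pv_mem_scan (tl : List Char) (y : String) :
    y ∈ pvScan tl ↔ ∃ p ∈ pvKeywordCategory, PySem.Chars.isIn p.1.toList tl = true ∧ y = p.2 := by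
  unfold pvScan
  rw [pv_mem_outer]
  have hbuck : ∀ i ∈ List.range tl.length,
      (∃ p ∈ PySem.Dict.getD pvFirstCharIndex (tl.getD i ' ') [],
        p.1.toList.isPrefixOf (tl.drop i) ∧ y = p.2) ↔
      (∃ p ∈ pvKeywordCategory, p.1.toList.isPrefixOf (tl.drop i) ∧ y = p.2) :=
    fun i _ => pv_bucket_exists tl i y
  constructor
  · rintro (h | ⟨i, hi, hp⟩)
    · simp [PySem.Set.empty] at h
    · obtain ⟨p, hp, hpre, hy⟩ := (hbuck i hi).mp hp
      have hne : p.1.toList ≠ [] := pv_keyword_ne_nil p hp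
      exact ⟨p, hp, (pv_exists_pos_iff_isIn tl p.1.toList hne).mp ⟨i, hi, hpre⟩, hy⟩
  · rintro ⟨p, hp, hin, hy⟩
    have hne : p.1.toList ≠ [] := pv_keyword_ne_nil p hp
    obtain ⟨i, hi, hpre⟩ := (pv_exists_pos_iff_isIn tl p.1.toList hne).mpr hin
    exact Or.inr ⟨i, hi, (hbuck i hi).mpr ⟨p, hp, hpre, hy⟩⟩

-- per-category: set membership equals A's any-test
lemma pv_contains_scan (tl : List Char) (c : String) :
    PySem.Set.contains (pvScan tl) c = true ↔
      ∃ p ∈ pvKeywordCategory, PySem.Chars.isIn p.1.toList tl = true ∧ c = p.2 := by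
  rw [PySem.Set.contains_iff, pv_mem_scan]

-- one category's set membership equals A's any-test over that category's keyword list
lemma pv_contains_finance (tl : List Char) :
    PySem.Set.contains (pvScan tl) "Finance" =
      (["budget", "actual", "variance", "cost", "expense", "profit"].any
        (fun k => PySem.Chars.isIn k.toList tl)) := by
  rw [Bool.eq_iff_iff, pv_contains_scan]
  simp [pvKeywordCategory]

lemma pv_contains_sales (tl : List Char) :
    PySem.Set.contains (pvScan tl) "Sales" =
      (["sales", "revenue", "target", "quota", "units sold"].any
        (fun k => PySem.Chars.isIn k.toList tl)) := by
  rw [Bool.eq_iff_iff, pv_contains_scan]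
  simp [pvKeywordCategory]

lemma pv_contains_hr (tl : List Char) :
    PySem.Set.contains (pvScan tl) "HR" =
      (["employee", "attrition", "headcount", "tenure", "satisfaction"].any
        (fun k => PySem.Chars.isIn k.toList tl)) := by
  rw [Bool.eq_iff_iff, pv_contains_scan]
  simp [pvKeywordCategory]

lemma pv_contains_operations (tl : List Char) :
    PySem.Set.contains (pvScan tl) "Operations" =
      (["defects", "downtime", "efficiency", "produced", "cycle"].any
        (fun k => PySem.Chars.isIn k.toList tl)) := by
  rw [Bool.eq_iff_iff, pv_contains_scan]
  simp [pvKeywordCategory]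

-- ===== VERDICT =====
theorem infer_function_from_columns_py_spec : Claim_equal_infer_function_from_columns_py := by
  intro df_columns _
  unfold Spec_infer_function_from_columns_py infer_function_from_columns_py infer_function_from_columns_py_alt
  by_cases h : df_columns = []
  · simp [h]
  · rw [if_neg h, if_neg h]
    simp only [pvPick, pvPriority, pv_contains_finance, pv_contains_sales, pv_contains_hr,
      pv_contains_operations, PySem.Str.isIn_eq]
    rfl
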